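-- pv_equiv track=rewrite | github.com/MeenPongpanit/SDN-handmade-develop_v2 | api(20-3-2562)/change_route.py | mask_to_bimask
-- ===== SOURCE A (Python) =====
-- def mask_to_bimask(mask):
--     bi_mask = []
--     ip = ''
--     for i in range(32):
--         if i <= mask:
--             ip += '1'
--         else:
--             ip += '0'
--         if ((i+1)%8 == 0 and i != 1) or i == 31:
--             bi_mask.append(ip)
--             ip = ''
--     return bi_mask
-- ===== SOURCE B (Python) =====
-- def mask_to_bimask(mask):
--     s = ''.join('1' if i <= mask else '0' for i in range(32))
--     return [s[i:i+8] for i in range(0, 32, 8)]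
-- ===== Notes on version B (the rewrite author's own statement) =====
-- stated objective: simpler
-- what changed: Two-phase build-then-chunk: B builds the full bit string in one comprehension and then slices it into four octets, instead of A's single loop that interleaves character emission with block-boundary bookkeeping and mutable accumulator resets.
import Mathlib
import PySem

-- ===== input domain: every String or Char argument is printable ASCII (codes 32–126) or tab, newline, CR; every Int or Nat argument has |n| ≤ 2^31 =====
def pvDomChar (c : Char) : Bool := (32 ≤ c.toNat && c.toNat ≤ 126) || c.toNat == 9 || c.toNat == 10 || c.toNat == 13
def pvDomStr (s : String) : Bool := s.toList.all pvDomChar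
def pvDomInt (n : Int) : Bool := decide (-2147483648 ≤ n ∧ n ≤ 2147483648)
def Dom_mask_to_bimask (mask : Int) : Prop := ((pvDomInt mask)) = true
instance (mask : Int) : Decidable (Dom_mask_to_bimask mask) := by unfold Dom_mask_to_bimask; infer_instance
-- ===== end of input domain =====

-- B replaces A's single loop with interleaved block-boundary bookkeeping by a
-- two-phase build-then-chunk decomposition (simpler); same return value everywhere.

-- ===== PORT A =====
-- Strings are carried as List Char (Python's += on a str) and packed with
-- String.ofList on append; exact since only '0'/'1' characters occur.
def mask_to_bimask (mask : Int) : List String :=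
  ((PySem.List.pyRange 0 32 1).foldl
    (fun (st : List String × List Char) i =>
      let ip := st.2 ++ (if i ≤ mask then ['1'] else ['0'])
      if (PySem.Int.mod (i + 1) 8 == 0 && i != 1) || i == 31 then
        (st.1 ++ [String.ofList ip], ([] : List Char))
      else
        (st.1, ip))
    ([], [])).1

-- ===== PORT B =====
-- ''.join of one-char strings is the char list; s[i:i+8] is PySem.List.slice,
-- packed to String at the end; exact on these ASCII characters.
def mask_to_bimask_alt (mask : Int) : List String :=
  let s : List Char := (PySem.List.pyRange 0 32 1).map (fun i => if i ≤ mask then '1' else '0')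
  (PySem.List.pyRange 0 32 8).map (fun i => String.ofList (PySem.List.slice s (some i) (some (i + 8))))

-- ===== PRECONDITION & SPEC =====
def Spec_mask_to_bimask (mask : Int) (out : List String) : Prop := out = mask_to_bimask_alt mask
instance (mask : Int) (out : List String) : Decidable (Spec_mask_to_bimask mask out) := by unfold Spec_mask_to_bimask; infer_instance

-- ===== CLAIM (what is proved, stated in full; the proofs are below) =====
def Claim_equal_mask_to_bimask : Prop := ∀ (mask : Int), Dom_mask_to_bimask mask → Spec_mask_to_bimask mask (mask_to_bimask mask)

-- ===== LEMMAS AND PROOFS =====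

-- Both ports only look at mask through the comparisons i ≤ mask for i ∈ [0,32).
lemma mask_to_bimask_congr (m₁ m₂ : Int)
    (h : ∀ i : Int, 0 ≤ i → i < 32 → ((i ≤ m₁) ↔ (i ≤ m₂))) :
    mask_to_bimask m₁ = mask_to_bimask m₂ := by
  unfold mask_to_bimask
  congr 1
  apply PySem.List.foldl_congr_mem
  intro acc i hi
  rw [PySem.List.mem_pyRange_one] at hi
  simp only [h i hi.1 hi.2]

lemma mask_to_bimask_alt_congr (m₁ m₂ : Int)
    (h : ∀ i : Int, 0 ≤ i → i < 32 → ((i ≤ m₁) ↔ (i ≤ m₂))) :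
    mask_to_bimask_alt m₁ = mask_to_bimask_alt m₂ := by
  unfold mask_to_bimask_alt
  have hs : (PySem.List.pyRange 0 32 1).map (fun i => if i ≤ m₁ then '1' else '0')
      = (PySem.List.pyRange 0 32 1).map (fun i => if i ≤ m₂ then '1' else '0') := by
    apply List.map_congr_left
    intro i hi
    rw [PySem.List.mem_pyRange_one] at hi
    simp only [h i hi.1 hi.2]
  simp only [hs]

-- Equality for every clamped mask value, by computation.
lemma mask_to_bimask_eq_clamped : ∀ c : Int, -1 ≤ c → c ≤ 31 →
    mask_to_bimask c = mask_to_bimask_alt c := by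
  decide

-- ===== VERDICT (by name: the statement is the Claim_ definition above) =====
theorem mask_to_bimask_spec : Claim_equal_mask_to_bimask := by
  intro mask _
  unfold Spec_mask_to_bimask
  have hcmp : ∀ i : Int, 0 ≤ i → i < 32 → ((i ≤ mask) ↔ (i ≤ max (-1) (min mask 31))) := by
    intro i h0 h32; omega
  rw [mask_to_bimask_congr mask (max (-1) (min mask 31)) hcmp,
      mask_to_bimask_alt_congr mask (max (-1) (min mask 31)) hcmp]
  exact mask_to_bimask_eq_clamped _ (by omega) (by omega)
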